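-- pv_equiv track=rewrite | github.com/Vitalii-Dm/daddy-agent | src/daddy_agent/codebase_graph/git_coupling.py | _parse_commits
-- ===== SOURCE A (Python) =====
-- def _parse_commits(git_output: str) -> list[set[str]]:
--     commits: list[set[str]] = []
--     current: set[str] = set()
--     for line in git_output.splitlines():
--         if line.startswith("__COMMIT__"):
--             if current:
--                 commits.append(current)
--             current = set()
--         elif line.strip():
--             current.add(line.strip())
--     if current:
--         commits.append(current)
--     return commits
-- ===== SOURCE B (Python) =====
-- def _parse_commits(git_output: str) -> list[set[str]]:
--     lines = git_output.splitlines()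
--     commits: list[set[str]] = []
--     i, n = 0, len(lines)
--     while i < n:
--         if lines[i].startswith("__COMMIT__"):
--             i += 1
--             continue
--         j = i + 1
--         while j < n and not lines[j].startswith("__COMMIT__"):
--             j += 1
--         s = {t for l in lines[i:j] if (t := l.strip())}
--         if s:
--             commits.append(s)
--         i = j
--     return commits
-- ===== Notes on version B (the rewrite author's own statement) =====
-- stated objective: alternative
-- what changed: B splits the line list into maximal runs of non-marker lines with an inner scan and builds each commit set from a whole run at once, instead of A's single pass that mutates a pending set and flushes it at each marker.
import Mathlib
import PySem

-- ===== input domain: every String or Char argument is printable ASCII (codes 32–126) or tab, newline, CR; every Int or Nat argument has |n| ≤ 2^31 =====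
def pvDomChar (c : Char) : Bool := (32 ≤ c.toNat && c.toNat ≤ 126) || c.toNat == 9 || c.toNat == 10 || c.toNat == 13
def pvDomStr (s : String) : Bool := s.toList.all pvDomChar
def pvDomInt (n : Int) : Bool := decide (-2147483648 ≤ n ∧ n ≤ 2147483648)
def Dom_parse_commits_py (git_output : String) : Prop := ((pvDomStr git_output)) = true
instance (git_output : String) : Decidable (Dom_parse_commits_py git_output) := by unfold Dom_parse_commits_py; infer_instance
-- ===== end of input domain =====

-- B groups the lines into maximal runs of non-marker lines (inner scan) and builds each
-- commit set from a whole run at once, instead of A's single mutable 'current' set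
-- flushed at each marker; alternative decomposition, same O(n) cost.


-- ===== PORT A =====
def parse_commits_py (git_output : String) : List (List String) :=
  let fin := (PySem.Str.splitlines git_output).foldl
    (fun (st : List (List String) × PySem.Set String) line =>
      if PySem.Str.startswith line "__COMMIT__" then
        ((if st.2 = [] then st.1 else st.1 ++ [st.2]), PySem.Set.empty)
      else if PySem.Str.strip line ≠ "" then
        (st.1, PySem.Set.add st.2 (PySem.Str.strip line))
      else st)
    ([], PySem.Set.empty)
  if fin.2 = [] then fin.1 else fin.1 ++ [fin.2]

-- ===== PORT B =====
def pvMarker (l : String) : Bool := PySem.Str.startswith l "__COMMIT__"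

-- runs of consecutive non-marker lines, ports B's two-level index scan
def pvRuns : List String → List (List String)
  | [] => []
  | x :: xs =>
    if pvMarker x then pvRuns xs
    else (x :: xs.takeWhile (fun y => !pvMarker y)) ::
         pvRuns (xs.dropWhile (fun y => !pvMarker y))
  termination_by xs => xs.length
  decreasing_by
    · simp
    · simpa using Nat.lt_succ_of_le (List.length_dropWhile_le _ xs)

def parse_commits_py_alt (git_output : String) : List (List String) :=
  (pvRuns (PySem.Str.splitlines git_output)).foldl
    (fun commits grp =>
      let s : PySem.Set String :=
        PySem.Set.ofList ((grp.map PySem.Str.strip).filter (fun t => t ≠ ""))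
      if s = [] then commits else commits ++ [s])
    []

-- ===== PRECONDITION & SPEC =====
def Spec_parse_commits_py (git_output : String) (out : List (List String)) : Prop := out = parse_commits_py_alt git_output
instance (git_output : String) (out : List (List String)) : Decidable (Spec_parse_commits_py git_output out) := by unfold Spec_parse_commits_py; infer_instance

-- ===== CLAIM (what is proved, stated in full; the proofs are below) =====
def Claim_equal_parse_commits_py : Prop := ∀ (git_output : String), Dom_parse_commits_py git_output → Spec_parse_commits_py git_output (parse_commits_py git_output)

-- ===== LEMMAS AND PROOFS =====

def pvStrips (ls : List String) : List String :=
  (ls.map PySem.Str.strip).filter (fun t => t ≠ "")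

def pvFlushIf (s : List String) : List (List String) := if s = [] then [] else [s]

-- result of B on a list of lines, flatMap form
def pvFME (xs : List String) : List (List String) :=
  (pvRuns xs).flatMap (fun grp => pvFlushIf (PySem.Set.ofList (pvStrips grp)))

theorem pvFoldB (rs : List (List String)) (acc : List (List String)) :
    rs.foldl (fun commits grp =>
      let s : PySem.Set String :=
        PySem.Set.ofList ((grp.map PySem.Str.strip).filter (fun t => t ≠ ""))
      if s = [] then commits else commits ++ [s]) acc
    = acc ++ rs.flatMap (fun grp => pvFlushIf (PySem.Set.ofList (pvStrips grp))) := by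
  induction rs generalizing acc with
  | nil => simp
  | cons g gs ih =>
    simp only [List.foldl_cons, List.flatMap_cons, ih, pvFlushIf, pvStrips]
    split <;> simp

-- decomposition of B's value at the first non-marker run
theorem pvFME_decomp (xs : List String) :
    pvFME xs = pvFlushIf (PySem.Set.ofList (pvStrips (xs.takeWhile (fun y => !pvMarker y))))
               ++ pvFME (xs.dropWhile (fun y => !pvMarker y)) := by
  cases xs with
  | nil => simp [pvFME, pvRuns, pvStrips, pvFlushIf]
  | cons x xs =>
    by_cases hx : pvMarker x = true
    · simp [pvFME, pvRuns, hx, pvStrips, pvFlushIf]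
    · simp only [Bool.not_eq_true] at hx
      simp [pvFME, pvRuns, hx]

-- A's loop with arbitrary carried state equals B's value, plus the pending set
theorem pvAstep (lines : List String) (cur : PySem.Set String) (acc : List (List String)) :
    (let fin := lines.foldl
        (fun (st : List (List String) × PySem.Set String) line =>
          if PySem.Str.startswith line "__COMMIT__" then
            ((if st.2 = [] then st.1 else st.1 ++ [st.2]), PySem.Set.empty)
          else if PySem.Str.strip line ≠ "" then
            (st.1, PySem.Set.add st.2 (PySem.Str.strip line))
          else st)
        (acc, cur)
      if fin.2 = [] then fin.1 else fin.1 ++ [fin.2])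
    = acc ++ pvFlushIf ((pvStrips (lines.takeWhile (fun y => !pvMarker y))).foldl PySem.Set.add cur)
          ++ pvFME (lines.dropWhile (fun y => !pvMarker y)) := by
  induction lines generalizing cur acc with
  | nil => simp [pvStrips, pvFlushIf, pvFME, pvRuns]; split <;> simp
  | cons x xs ih =>
    simp only [List.foldl_cons]
    by_cases hx : pvMarker x = true
    · have hx' : PySem.Str.startswith x "__COMMIT__" = true := hx
      simp only [hx', if_true]
      rw [ih]
      have h2 : pvFME (x :: xs) = pvFME xs := by simp [pvFME, pvRuns, hx]
      simp only [List.takeWhile_cons, List.dropWhile_cons, hx, Bool.not_true,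
        Bool.false_eq_true, if_false, h2]
      rw [pvFME_decomp xs]
      simp only [pvStrips, List.map_nil, List.filter_nil, List.foldl_nil,
        PySem.Set.ofList_eq_foldl, PySem.Set.empty, List.append_assoc]
      by_cases hc : cur = [] <;> simp [hc, pvFlushIf]
    · simp only [Bool.not_eq_true] at hx
      have hx' : PySem.Str.startswith x "__COMMIT__" = false := hx
      simp only [hx', Bool.false_eq_true, if_false,
        List.takeWhile_cons, List.dropWhile_cons, hx, Bool.not_false, if_true]
      by_cases hs : PySem.Str.strip x = ""
      · have e : (if PySem.Str.strip x ≠ "" then (acc, PySem.Set.add cur (PySem.Str.strip x))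
            else (acc, cur)) = (acc, cur) := if_neg (by simp [hs])
        rw [e, ih]
        simp [pvStrips, hs]
      · have e : (if PySem.Str.strip x ≠ "" then (acc, PySem.Set.add cur (PySem.Str.strip x))
            else (acc, cur)) = (acc, PySem.Set.add cur (PySem.Str.strip x)) := if_pos (by simp [hs])
        rw [e, ih]
        simp [pvStrips, hs]

-- ===== VERDICT (by name: the statement is the Claim_ definition above) =====
theorem parse_commits_py_spec : Claim_equal_parse_commits_py := by
  intro g _
  unfold Spec_parse_commits_py parse_commits_py parse_commits_py_alt
  rw [pvFoldB]
  have h := pvAstep (PySem.Str.splitlines g) PySem.Set.empty []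
  simp only [List.nil_append] at h
  rw [h]
  have h2 := pvFME_decomp (PySem.Str.splitlines g)
  simp only [PySem.Set.ofList_eq_foldl, PySem.Set.empty] at h2 ⊢
  rw [← h2]
  rfl
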